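-- pv_equiv track=rewrite | github.com/piperrier/linear_strand | order.py | lambdaa
-- ===== SOURCE A (Python) =====
-- def lambdaa(r, k_ideal, nu):
--     col = []
--     for i, k_i in enumerate(k_ideal):
--         if len(k_i)>1:
--             for j in range(1,len(k_i)):
--                 for h in range(0,j):
--                     col.append((sum(r[:i])+j)*nu + k_i[h])
--     return col
-- ===== SOURCE B (Python) =====
-- def lambdaa(r, k_ideal, nu):
--     # prefix sums of r computed once; base hoisted; inner h-loop replaced by a slice extend
--     pref = [0]
--     for x in r:
--         pref.append(pref[-1] + x)
--     col = []
--     for i, k_i in enumerate(k_ideal):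
--         s = pref[min(i, len(r))]
--         for j in range(1, len(k_i)):
--             base = (s + j) * nu
--             col.extend(base + v for v in k_i[:j])
--     return col
-- ===== Notes on version B (the rewrite author's own statement) =====
-- stated objective: faster
-- what changed: B precomputes the prefix sums of r once and hoists the (s+j)*nu base out of the inner loop, replacing A's per-element recomputation of sum(r[:i]) and the index-driven h-loop by a single slice extend.
import Mathlib
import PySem

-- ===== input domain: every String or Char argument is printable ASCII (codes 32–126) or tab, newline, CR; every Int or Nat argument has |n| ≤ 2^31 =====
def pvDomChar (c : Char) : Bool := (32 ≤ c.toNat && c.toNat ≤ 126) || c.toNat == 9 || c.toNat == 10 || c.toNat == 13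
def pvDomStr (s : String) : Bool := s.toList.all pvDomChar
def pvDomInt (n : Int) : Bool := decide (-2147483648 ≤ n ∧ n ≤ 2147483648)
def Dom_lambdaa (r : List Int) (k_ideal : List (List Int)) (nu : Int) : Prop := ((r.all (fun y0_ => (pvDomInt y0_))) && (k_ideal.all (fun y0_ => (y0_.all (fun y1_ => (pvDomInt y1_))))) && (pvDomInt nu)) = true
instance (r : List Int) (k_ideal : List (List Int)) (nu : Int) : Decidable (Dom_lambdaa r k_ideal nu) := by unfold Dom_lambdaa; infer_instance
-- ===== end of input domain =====

-- B replaces A's per-element recomputation of sum(r[:i]) by one prefix-sum table and a slice-based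
-- inner extend (objective: faster). Both programs are total; return values only, no mutation.

-- ===== PORT A =====
-- k_i[h] is always in range (0 ≤ h < j < len(k_i)), so pyGetD is exact here.
def lambdaa (r : List Int) (k_ideal : List (List Int)) (nu : Int) : List Int :=
  (PySem.List.enumerate k_ideal).foldl (fun col p =>
    if p.2.length > 1 then
      (PySem.List.pyRange 1 (p.2.length : Int) 1).foldl (fun col j =>
        (PySem.List.pyRange 0 j 1).foldl (fun col h =>
          col ++ [((PySem.List.slice r none (some p.1)).sum + j) * nu + PySem.List.pyGetD p.2 h 0]) col) col
    else col) []

-- ===== PORT B =====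
-- pref[-1] and pref[min(i, len(r))] are always in range (pref is nonempty of length len(r)+1),
-- so pyGetD is exact here.
def lambdaa_alt (r : List Int) (k_ideal : List (List Int)) (nu : Int) : List Int :=
  let pref := r.foldl (fun p x => p ++ [PySem.List.pyGetD p (-1) 0 + x]) [0]
  (PySem.List.enumerate k_ideal).foldl (fun col p =>
    let s := PySem.List.pyGetD pref (min p.1 (r.length : Int)) 0
    (PySem.List.pyRange 1 (p.2.length : Int) 1).foldl (fun col j =>
      let base := (s + j) * nu
      col ++ (PySem.List.slice p.2 none (some j)).map (fun v => base + v)) col) []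

-- ===== PRECONDITION & SPEC =====
def Spec_lambdaa (r : List Int) (k_ideal : List (List Int)) (nu : Int) (out : List Int) : Prop := out = lambdaa_alt r k_ideal nu
instance (r : List Int) (k_ideal : List (List Int)) (nu : Int) (out : List Int) : Decidable (Spec_lambdaa r k_ideal nu out) := by unfold Spec_lambdaa; infer_instance

-- ===== CLAIM (what is proved, stated in full; the proofs are below) =====
def Claim_equal_lambdaa : Prop := ∀ (r : List Int) (k_ideal : List (List Int)) (nu : Int), Dom_lambdaa r k_ideal nu → Spec_lambdaa r k_ideal nu (lambdaa r k_ideal nu)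

-- ===== LEMMAS AND PROOFS =====

/-- Running sums of a list starting from `s` (the tail of B's `pref` table). -/
def runSums : Int → List Int → List Int
  | _, [] => []
  | s, x :: xs => (s + x) :: runSums (s + x) xs

/-- B's `pref` loop builds the running-sum table. -/
lemma pref_foldl (r : List Int) (ys : List Int) (s : Int) :
    r.foldl (fun p x => p ++ [PySem.List.pyGetD p (-1) 0 + x]) (ys ++ [s])
      = ys ++ [s] ++ runSums s r := by
  induction r generalizing ys s with
  | nil => simp [runSums]
  | cons x xs ih =>
    simp only [List.foldl_cons, PySem.List.pyGetD_neg_one_append_singleton]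
    rw [show ys ++ [s] ++ [s + x] = (ys ++ [s]) ++ [s + x] by simp, ih]
    simp [runSums]

/-- Indexing the running-sum table yields a prefix sum. -/
lemma runSums_get (r : List Int) (s : Int) (n : Nat) (h : n ≤ r.length) :
    (s :: runSums s r)[n]? = some (s + (r.take n).sum) := by
  induction r generalizing s n with
  | nil =>
    have hn : n = 0 := by simpa using h
    subst hn; simp
  | cons x xs ih =>
    cases n with
    | zero => simp
    | succ m =>
      simp only [runSums, List.getElem?_cons_succ]
      rw [ih (s + x) m (by simpa using h)]
      simp only [List.take_succ_cons, List.sum_cons]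
      ring_nf

/-- Reading `range(0, j)` through `k_i` is the prefix `take j`. -/
lemma map_pyGetD_range_take (l : List Int) (jn : Nat) (hj : jn ≤ l.length) :
    (PySem.List.pyRange 0 (jn : Int) 1).map (fun h => PySem.List.pyGetD l h 0)
      = l.take jn := by
  have hlen : ((l.take jn).length : Int) = (jn : Int) := by
    simp [List.length_take, Nat.min_eq_left hj]
  have hbase := PySem.List.map_pyGetD_pyRange_zero (l.take jn) 0
  rw [PySem.List.len] at hbase
  rw [hlen] at hbase
  rw [← hbase]
  apply List.map_congr_left
  intro h hmem
  obtain ⟨h0, hlt⟩ := PySem.List.mem_pyRange_one.mp hmem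
  rw [PySem.List.pyGetD_eq_getElem l 0 h0 (by omega),
      PySem.List.pyGetD_eq_getElem (l.take jn) 0 h0 (by simpa [List.length_take, Nat.min_eq_left hj] using hlt)]
  exact List.getElem_take.symm

-- ===== VERDICT (by name: the statement is the Claim_ definition above) =====
theorem lambdaa_spec : Claim_equal_lambdaa := by
  intro r k_ideal nu _
  show lambdaa r k_ideal nu = lambdaa_alt r k_ideal nu
  unfold lambdaa lambdaa_alt
  rw [show ([0] : List Int) = [] ++ [0] by simp, pref_foldl r [] 0]
  apply PySem.List.foldl_congr_mem
  intro col p hp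
  obtain ⟨kk, hk, rfl⟩ := (PySem.List.mem_enumerate_iff k_ideal 0 p).mp hp
  simp only [zero_add]
  -- the two per-row sums agree
  have hs : PySem.List.pyGetD ([] ++ [0] ++ runSums 0 r) (min (kk : Int) (r.length : Int)) 0
      = (List.take kk r).sum := by
    have hmin : (min (kk : Int) (r.length : Int)) = ((min kk r.length : Nat) : Int) := by
      simp [Nat.cast_min]
    rw [hmin, PySem.List.pyGetD_natCast]
    have := runSums_get r 0 (min kk r.length) (Nat.min_le_right _ _)
    simp only [List.nil_append, List.singleton_append]
    rw [List.getD, this]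
    have : r.take (min kk r.length) = r.take kk := by
      rcases Nat.le_total kk r.length with h | h
      · rw [Nat.min_eq_left h]
      · rw [Nat.min_eq_right h, List.take_of_length_le h, List.take_of_length_le (le_refl _)]
    simp [this]
  simp only [List.nil_append, List.singleton_append] at hs
  by_cases hl : k_ideal[kk].length > 1
  · simp only [hl, if_true]
    apply PySem.List.foldl_congr_mem
    intro col' j hj
    obtain ⟨h1, hjlt⟩ := PySem.List.mem_pyRange_one.mp hj
    rw [PySem.List.foldl_append_singleton_eq_map]
    congr 1
    rw [PySem.List.slice_to k_ideal[kk] (show (0:Int) ≤ j by omega),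
        ← map_pyGetD_range_take k_ideal[kk] j.toNat (by omega), List.map_map,
        show ((j.toNat : Nat) : Int) = j by omega]
    apply List.map_congr_left
    intro h _
    simp [hs, Function.comp]
  · simp only [hl, if_false]
    have : PySem.List.pyRange 1 (k_ideal[kk].length : Int) 1 = [] := by
      rw [PySem.List.pyRange_one]
      have : ((k_ideal[kk].length : Int) - 1).toNat = 0 := by omega
      simp [this]
    simp [this]
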